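-- pv_equiv track=rewrite | github.com/AnonyGiit/DirGen | pydot-test-v5.py | getInterestingMarkerSetV3
-- ===== SOURCE A (Python) =====
-- def getInterestingMarkerSetV3(d):
--     markers = set()
--     path_set1 = set()
--     path_set2 = set()
--     paths1 = d["test1"]
--     paths2 = d['test2']
--     if paths1 is not None:
--         for path1 in paths1:
--             for p1 in path1:
--                 path_set1.add(p1)
--     if paths2 is not None:
--         for path2 in paths2:
--             for p2 in path2:
--                 path_set2.add(p2)
--     interesting_marker1 = path_set1.union(path_set2) - path_set1
--     interesting_marker2 = path_set1.union(path_set2) - path_set2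
--     markers = interesting_marker1 | interesting_marker2  # add two sets to be one
--     return markers
-- ===== SOURCE B (Python) =====
-- def getInterestingMarkerSetV3(d):
--     # Flatten each collection once with comprehensions (no interim sets),
--     # then keep the elements whose memberships in the two flat lists differ.
--     flat1 = [p for path in d["test1"] or [] for p in path]
--     flat2 = [p for path in d['test2'] or [] for p in path]
--     return {p for p in flat2 + flat1 if (p in flat1) != (p in flat2)}
-- ===== Notes on version B (the rewrite author's own statement) =====
-- stated objective: simpler
-- what changed: B builds no interim sets and does no set algebra: it flattens each collection into a plain list by comprehension and selects, in one filtering pass over the concatenation, the elements whose memberships in the two flat lists differ (an xor test), collecting them directly into the result set.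
import Mathlib
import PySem

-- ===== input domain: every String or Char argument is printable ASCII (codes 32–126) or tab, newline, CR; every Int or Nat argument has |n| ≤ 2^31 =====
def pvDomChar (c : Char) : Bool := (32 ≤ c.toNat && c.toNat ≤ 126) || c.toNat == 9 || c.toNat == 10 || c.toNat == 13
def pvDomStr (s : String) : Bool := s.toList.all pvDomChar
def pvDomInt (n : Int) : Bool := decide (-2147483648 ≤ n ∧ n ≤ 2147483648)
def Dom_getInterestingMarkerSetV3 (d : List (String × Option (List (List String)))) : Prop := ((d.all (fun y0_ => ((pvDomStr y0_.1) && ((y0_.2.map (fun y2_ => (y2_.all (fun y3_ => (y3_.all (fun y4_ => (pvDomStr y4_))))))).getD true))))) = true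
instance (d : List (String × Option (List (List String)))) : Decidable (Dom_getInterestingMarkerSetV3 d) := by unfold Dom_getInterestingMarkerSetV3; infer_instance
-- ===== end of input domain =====

-- B builds no interim sets and uses no set algebra: it flattens each collection into a plain
-- list by comprehension and keeps, in one filtering pass over the concatenation, the elements
-- whose memberships in the two flat lists differ; same return value wherever A returns.

-- ===== PORT A =====
def getInterestingMarkerSetV3 (d : List (String × Option (List (List String)))) : List String :=
  match (PySem.Dict.mk d).get? "test1", (PySem.Dict.mk d).get? "test2" with
  | some paths1, some paths2 =>
      let pathSet1 : PySem.Set String :=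
        match paths1 with
        | none => PySem.Set.empty
        | some ps => ps.foldl (fun s path1 => path1.foldl (fun s p1 => PySem.Set.add s p1) s) PySem.Set.empty
      let pathSet2 : PySem.Set String :=
        match paths2 with
        | none => PySem.Set.empty
        | some ps => ps.foldl (fun s path2 => path2.foldl (fun s p2 => PySem.Set.add s p2) s) PySem.Set.empty
      let interestingMarker1 := PySem.Set.diff (PySem.Set.union pathSet1 pathSet2) pathSet1
      let interestingMarker2 := PySem.Set.diff (PySem.Set.union pathSet1 pathSet2) pathSet2
      PySem.Set.union interestingMarker1 interestingMarker2
  | _, _ => []  -- KeyError: excluded by Pre_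

-- ===== PORT B =====
def getInterestingMarkerSetV3_alt (d : List (String × Option (List (List String)))) : List String :=
  match (PySem.Dict.mk d).get? "test1" with
  | none => []  -- KeyError: excluded by Pre_
  | some paths1 =>
    match (PySem.Dict.mk d).get? "test2" with
    | none => []  -- KeyError: excluded by Pre_
    | some paths2 =>
      -- `x or []` on an Option of a list: None (and []) become []
      let flat1 : List String := (paths1.getD []).flatMap (fun path => path)
      let flat2 : List String := (paths2.getD []).flatMap (fun path => path)
      PySem.Set.ofList ((flat2 ++ flat1).filter (fun p => flat1.contains p != flat2.contains p))

-- ===== PRECONDITION & SPEC =====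
-- Pre_ excludes exactly the dicts missing the key "test1" or "test2", on which A raises KeyError.
def Pre_getInterestingMarkerSetV3 (d : List (String × Option (List (List String)))) : Prop :=
  "test1" ∈ d.map Prod.fst ∧ "test2" ∈ d.map Prod.fst
instance (d : List (String × Option (List (List String)))) : Decidable (Pre_getInterestingMarkerSetV3 d) := by unfold Pre_getInterestingMarkerSetV3; infer_instance

def pvWitness_getInterestingMarkerSetV3 : (List (String × Option (List (List String)))) :=
  [("test1", some [["a", "b"], ["a"]]), ("test2", some [["b", "c"]])]

def Spec_getInterestingMarkerSetV3 (d : List (String × Option (List (List String)))) (out : List String) : Prop := out = getInterestingMarkerSetV3_alt d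
instance (d : List (String × Option (List (List String)))) (out : List String) : Decidable (Spec_getInterestingMarkerSetV3 d out) := by unfold Spec_getInterestingMarkerSetV3; infer_instance

-- ===== CLAIM (what is proved, stated in full; the proofs are below) =====
def Claim_equal_getInterestingMarkerSetV3 : Prop := ∀ (d : List (String × Option (List (List String)))), Dom_getInterestingMarkerSetV3 d → Pre_getInterestingMarkerSetV3 d → Spec_getInterestingMarkerSetV3 d (getInterestingMarkerSetV3 d)

-- ===== LEMMAS AND PROOFS =====

-- set(xs) commutes with filtering: set of the filtered list = filtered set of the list
lemma pv_ofList_filter (p : String → Bool) (l : List String) :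
    PySem.Set.ofList (l.filter p) = (PySem.Set.ofList l).filter p := by
  induction l with
  | nil => rfl
  | cons x l ih =>
      by_cases hx : p x = true
      · rw [List.filter_cons_of_pos hx, PySem.Set.ofList_cons, PySem.Set.ofList_cons,
            show ∀ s : PySem.Set String, PySem.Set.discard s x = s.filter (fun y => !(y == x)) from fun _ => rfl,
            show ∀ s : PySem.Set String, PySem.Set.discard s x = s.filter (fun y => !(y == x)) from fun _ => rfl,
            ih, List.filter_cons_of_pos hx, List.filter_filter, List.filter_filter]
        congr 1
        apply List.filter_congr
        intro a _
        exact Bool.and_comm _ _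
      · rw [List.filter_cons_of_neg hx, PySem.Set.ofList_cons,
            show ∀ s : PySem.Set String, PySem.Set.discard s x = s.filter (fun y => !(y == x)) from fun _ => rfl,
            List.filter_cons_of_neg hx, ih, List.filter_filter]
        apply List.filter_congr
        intro a _
        by_cases hax : a = x
        · subst hax; simp [hx]
        · simp [hax]

-- the per-branch equality, on the flattened element lists
lemma pv_core (F1 F2 : List String) :
    PySem.Set.union
        (PySem.Set.diff (PySem.Set.union (PySem.Set.ofList F1) (PySem.Set.ofList F2)) (PySem.Set.ofList F1))
        (PySem.Set.diff (PySem.Set.union (PySem.Set.ofList F1) (PySem.Set.ofList F2)) (PySem.Set.ofList F2))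
    = PySem.Set.ofList ((F2 ++ F1).filter (fun p => F1.contains p != F2.contains p)) := by
  have hdiff : ∀ (s t : PySem.Set String), PySem.Set.diff s t = s.filter (fun x => !(PySem.Set.contains t x)) := fun _ _ => rfl
  have hmem1 : ∀ a : String, PySem.Set.contains (PySem.Set.ofList F1) a = F1.contains a := by
    intro a
    by_cases h : a ∈ F1
    · simp [PySem.Set.mem_ofList, h]
    · simp [PySem.Set.mem_ofList, h]
  have hmem2 : ∀ a : String, PySem.Set.contains (PySem.Set.ofList F2) a = F2.contains a := by
    intro a
    by_cases h : a ∈ F2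
    · simp [PySem.Set.mem_ofList, h]
    · simp [PySem.Set.mem_ofList, h]
  -- names for the two one-sided remainders
  set L1 := PySem.Set.ofList F1 with hL1
  set L2 := PySem.Set.ofList F2 with hL2
  set L2f := L2.filter (fun y => !(PySem.Set.contains L1 y)) with hL2f
  set L1f := L1.filter (fun y => !(PySem.Set.contains L2 y)) with hL1f
  -- A side
  have hU : PySem.Set.union L1 L2 = L1 ++ L2f := by
    show PySem.Set.update L1 L2 = _
    rw [PySem.Set.update_eq_append_filter, hL1, hL2, PySem.Set.ofList_ofList]
  have hD1 : PySem.Set.diff (PySem.Set.union L1 L2) L1 = L2f := by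
    rw [hU, hdiff, List.filter_append, List.filter_filter]
    have h1 : L1.filter (fun x => !(PySem.Set.contains L1 x)) = [] := by
      rw [List.filter_eq_nil_iff]
      intro a ha
      simpa using ha
    have h2 : L2.filter (fun a => !(PySem.Set.contains L1 a) && !(PySem.Set.contains L1 a)) = L2f := by
      rw [hL2f]; apply List.filter_congr; intro a _; exact Bool.and_self _
    rw [h1, h2, List.nil_append]
  have hD2 : PySem.Set.diff (PySem.Set.union L1 L2) L2 = L1f := by
    rw [hU, hdiff, List.filter_append]
    have h2 : L2f.filter (fun x => !(PySem.Set.contains L2 x)) = [] := by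
      rw [List.filter_eq_nil_iff]
      intro a ha
      have : a ∈ L2 := List.mem_of_mem_filter ha
      simpa using this
    rw [h2, List.append_nil, hL1f]
  have hA : PySem.Set.union
      (PySem.Set.diff (PySem.Set.union L1 L2) L1)
      (PySem.Set.diff (PySem.Set.union L1 L2) L2)
      = L2f ++ L1f.filter (fun y => !(PySem.Set.contains L2f y)) := by
    rw [hD1, hD2]
    show PySem.Set.update L2f L1f = _
    rw [PySem.Set.update_eq_append_filter,
        PySem.Set.ofList_eq_self_of_nodup L1f ((PySem.Set.nodup_ofList F1).filter _)]
  -- B side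
  have hcond2 : L2.filter (fun p => F1.contains p != F2.contains p) = L2f := by
    rw [hL2f]
    apply List.filter_congr
    intro a ha
    have ha2 : a ∈ F2 := (PySem.Set.mem_ofList F2 a).1 ha
    rw [hmem1]
    by_cases h1 : a ∈ F1 <;> simp [h1, ha2]
  have hcond1 : L1.filter (fun p => F1.contains p != F2.contains p) = L1f := by
    rw [hL1f]
    apply List.filter_congr
    intro a ha
    have ha1 : a ∈ F1 := (PySem.Set.mem_ofList F1 a).1 ha
    rw [hmem2]
    by_cases h2 : a ∈ F2 <;> simp [h2, ha1]
  have hB : PySem.Set.ofList ((F2 ++ F1).filter (fun p => F1.contains p != F2.contains p))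
      = L2f ++ L1f.filter (fun y => !(PySem.Set.contains L2f y)) := by
    rw [List.filter_append, PySem.Set.ofList_append, PySem.Set.update_eq_append_filter,
        pv_ofList_filter, pv_ofList_filter, ← hL1, ← hL2, hcond1, hcond2]
  rw [hA, hB]

-- ===== VERDICT (by name: the statement is the Claim_ definition above) =====
theorem getInterestingMarkerSetV3_spec : Claim_equal_getInterestingMarkerSetV3 := by
  intro d _ hpre
  obtain ⟨h1m, h2m⟩ := hpre
  show getInterestingMarkerSetV3 d = getInterestingMarkerSetV3_alt d
  obtain ⟨p1, hp1⟩ : ∃ v, (PySem.Dict.mk d).get? "test1" = some v := by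
    cases hc : (PySem.Dict.mk d).get? "test1" with
    | none =>
        exact absurd ((PySem.Dict.get?_eq_none_iff_not_mem_keys _ _).1 hc)
          (by simpa [PySem.Dict.keys_mk] using h1m)
    | some v => exact ⟨v, rfl⟩
  obtain ⟨p2, hp2⟩ : ∃ v, (PySem.Dict.mk d).get? "test2" = some v := by
    cases hc : (PySem.Dict.mk d).get? "test2" with
    | none =>
        exact absurd ((PySem.Dict.get?_eq_none_iff_not_mem_keys _ _).1 hc)
          (by simpa [PySem.Dict.keys_mk] using h2m)
    | some v => exact ⟨v, rfl⟩
  unfold getInterestingMarkerSetV3 getInterestingMarkerSetV3_alt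
  rw [hp1, hp2]
  cases p1 with
  | none =>
      cases p2 with
      | none => simpa using pv_core [] []
      | some ps2 =>
          dsimp only [Option.getD]
          rw [← List.foldl_flatten, List.flatMap_id']
          simpa using pv_core [] ps2.flatten
  | some ps1 =>
      cases p2 with
      | none =>
          dsimp only [Option.getD]
          rw [← List.foldl_flatten, List.flatMap_id']
          simpa using pv_core ps1.flatten []
      | some ps2 =>
          dsimp only [Option.getD]
          rw [← List.foldl_flatten, ← List.foldl_flatten, List.flatMap_id', List.flatMap_id']
          exact pv_core ps1.flatten ps2.flatten
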